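-- pv_equiv track=rewrite | github.com/AFERRAZOLI/b3-bmf-derivatives | backend/src/b3_client.py | parse_ticker
-- ===== SOURCE A (Python) =====
-- ASSET_LABELS = {
--     "DI1": "DI Futuro",
--     "DOL": "Dólar Futuro",
--     "WDO": "Mini Dólar",
--     "IND": "Ibovespa Futuro",
--     "WIN": "Mini Ibovespa",
--     "DDI": "Cupom Cambial",
--     "FRC": "FRA de Cupom",
--     "DAP": "DI x IPCA",
--     "ODF": "Opção s/ DI",
-- }
--
-- MONTH_CODES = {
--     "F": "Jan", "G": "Feb", "H": "Mar", "J": "Apr",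
--     "K": "May", "M": "Jun", "N": "Jul", "Q": "Aug",
--     "U": "Sep", "V": "Oct", "X": "Nov", "Z": "Dec",
-- }
--
-- def parse_ticker(ticker: str) -> tuple[str, str, str]:
--     """Extract asset class, label, and expiry from ticker.
--
--     E.g. DI1F29 -> ('DI1', 'DI Futuro', 'Jan/29')
--     """
--     for i in range(len(ticker) - 3, 0, -1):
--         ch = ticker[i]
--         rest = ticker[i + 1:]
--         if ch in MONTH_CODES and rest.isdigit():
--             asset = ticker[:i]
--             month = MONTH_CODES[ch]
--             year = rest
--             label = ASSET_LABELS.get(asset, asset)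
--             return asset, label, f"{month}/{year}"
--     return ticker, ASSET_LABELS.get(ticker, ticker), ""
-- ===== SOURCE B (Python) =====
-- ASSET_LABELS = {
--     "DI1": "DI Futuro",
--     "DOL": "Dólar Futuro",
--     "WDO": "Mini Dólar",
--     "IND": "Ibovespa Futuro",
--     "WIN": "Mini Ibovespa",
--     "DDI": "Cupom Cambial",
--     "FRC": "FRA de Cupom",
--     "DAP": "DI x IPCA",
--     "ODF": "Opção s/ DI",
-- }
--
-- MONTH_CODES = {
--     "F": "Jan", "G": "Feb", "H": "Mar", "J": "Apr",
--     "K": "May", "M": "Jun", "N": "Jul", "Q": "Aug",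
--     "U": "Sep", "V": "Oct", "X": "Nov", "Z": "Dec",
-- }
--
-- def parse_ticker(ticker: str) -> tuple[str, str, str]:
--     """Extract asset class, label, and expiry from ticker — single O(n) scan.
--
--     The digit suffix is maximal, and no month-code letter is a digit, so the
--     only possible split point is the character just before the trailing digit
--     run: count the trailing digits once and check that one character.
--     """
--     k = 0
--     for ch in reversed(ticker):
--         if not ch.isdigit():
--             break
--         k += 1
--     i = len(ticker) - k - 1
--     if k >= 2 and i >= 1 and ticker[i] in MONTH_CODES:
--         asset = ticker[:i]
--         return asset, ASSET_LABELS.get(asset, asset), f"{MONTH_CODES[ticker[i]]}/{ticker[i + 1:]}"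
--     return ticker, ASSET_LABELS.get(ticker, ticker), ""
-- ===== Notes on version B (the rewrite author's own statement) =====
-- stated objective: faster
-- what changed: A scans candidate split points from the right and re-checks the whole remaining suffix with isdigit at each step (quadratic); B counts the trailing digit run once and tests the single character just before it as a month code, which is the only possible split point since month-code letters are not digits.
import Mathlib
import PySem

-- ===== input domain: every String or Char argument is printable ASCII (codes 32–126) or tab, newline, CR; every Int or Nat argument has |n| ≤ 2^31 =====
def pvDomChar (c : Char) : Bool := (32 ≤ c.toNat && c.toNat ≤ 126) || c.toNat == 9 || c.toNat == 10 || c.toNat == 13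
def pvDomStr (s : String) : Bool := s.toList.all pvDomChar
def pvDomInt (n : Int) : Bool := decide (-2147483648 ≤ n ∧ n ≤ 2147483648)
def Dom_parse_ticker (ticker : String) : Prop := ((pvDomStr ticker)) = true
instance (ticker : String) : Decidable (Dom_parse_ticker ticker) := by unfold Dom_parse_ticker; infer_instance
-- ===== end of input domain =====

-- B replaces A's quadratic descending scan (each step re-checks a whole suffix with isdigit)
-- by one count of the trailing digit run and a single month-code test of the character before it.

-- shared module constants (the two Python dicts)
def pvMonthCodes : PySem.Dict Char String := PySem.Dict.ofList
  [('F', "Jan"), ('G', "Feb"), ('H', "Mar"), ('J', "Apr"),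
   ('K', "May"), ('M', "Jun"), ('N', "Jul"), ('Q', "Aug"),
   ('U', "Sep"), ('V', "Oct"), ('X', "Nov"), ('Z', "Dec")]

def pvAssetLabels : PySem.Dict String String := PySem.Dict.ofList
  [("DI1", "DI Futuro"), ("DOL", "Dólar Futuro"), ("WDO", "Mini Dólar"),
   ("IND", "Ibovespa Futuro"), ("WIN", "Mini Ibovespa"), ("DDI", "Cupom Cambial"),
   ("FRC", "FRA de Cupom"), ("DAP", "DI x IPCA"), ("ODF", "Opção s/ DI")]

-- ===== PORT A =====
-- A's for-loop with early return: none = the loop fell through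
def pvLoopA (cs : List Char) : List Int → Option (String × String × String)
  | [] => none
  | i :: is =>
    match PySem.List.pyGet? cs i with
    | some ch =>
      if pvMonthCodes.contains ch
          && PySem.Chars.strIsdigit (PySem.List.slice cs (some (i + 1)) none) then
        let asset := String.ofList (PySem.List.slice cs none (some i))
        some (asset, pvAssetLabels.getD asset asset,
          String.ofList ((pvMonthCodes.getD ch "").toList ++ '/' :: PySem.List.slice cs (some (i + 1)) none))
      else pvLoopA cs is
    | none => pvLoopA cs is

def parse_ticker (ticker : String) : String × String × String :=
  match pvLoopA ticker.toList (PySem.List.pyRange ((ticker.toList.length : Int) - 3) 0 (-1)) with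
  | some r => r
  | none => (ticker, pvAssetLabels.getD ticker ticker, "")

-- ===== PORT B =====
-- 'for ch in reversed(ticker): if not ch.isdigit(): break; k += 1'
def pvCountDigits : List Char → Nat
  | [] => 0
  | c :: cs => if PySem.Chars.isdigit c then pvCountDigits cs + 1 else 0

def parse_ticker_alt (ticker : String) : String × String × String :=
  let cs := ticker.toList
  let k := pvCountDigits cs.reverse
  let i : Int := (cs.length : Int) - (k : Int) - 1
  if 2 ≤ k ∧ 1 ≤ i then
    match PySem.List.pyGet? cs i with
    | some ch =>
      if pvMonthCodes.contains ch then
        let asset := String.ofList (PySem.List.slice cs none (some i))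
        (asset, pvAssetLabels.getD asset asset,
          String.ofList ((pvMonthCodes.getD ch "").toList ++ '/' :: PySem.List.slice cs (some (i + 1)) none))
      else (ticker, pvAssetLabels.getD ticker ticker, "")
    | none => (ticker, pvAssetLabels.getD ticker ticker, "")
  else (ticker, pvAssetLabels.getD ticker ticker, "")

-- ===== PRECONDITION & SPEC =====
def Spec_parse_ticker (ticker : String) (out : String × String × String) : Prop := out = parse_ticker_alt ticker
instance (ticker : String) (out : String × String × String) : Decidable (Spec_parse_ticker ticker out) := by unfold Spec_parse_ticker; infer_instance

-- ===== CLAIM (what is proved, stated in full; the proofs are below) =====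
def Claim_equal_parse_ticker : Prop := ∀ (ticker : String), Dom_parse_ticker ticker → Spec_parse_ticker ticker (parse_ticker ticker)

-- ===== LEMMAS AND PROOFS =====

-- proof-only helpers
def pvHit (cs : List Char) (i : Int) : Bool :=
  match PySem.List.pyGet? cs i with
  | some ch => pvMonthCodes.contains ch
      && PySem.Chars.strIsdigit (PySem.List.slice cs (some (i + 1)) none)
  | none => false

def pvHitVal (cs : List Char) (i : Int) : String × String × String :=
  match PySem.List.pyGet? cs i with
  | some ch =>
    let asset := String.ofList (PySem.List.slice cs none (some i))
    (asset, pvAssetLabels.getD asset asset,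
      String.ofList ((pvMonthCodes.getD ch "").toList ++ '/' :: PySem.List.slice cs (some (i + 1)) none))
  | none => ("", "", "")

lemma pvLoopA_cons (cs : List Char) (i : Int) (is : List Int) :
    pvLoopA cs (i :: is) = if pvHit cs i then some (pvHitVal cs i) else pvLoopA cs is := by
  cases h : PySem.List.pyGet? cs i with
  | none => simp [pvLoopA, pvHit, h]
  | some ch =>
    by_cases hb : (pvMonthCodes.contains ch
        && PySem.Chars.strIsdigit (PySem.List.slice cs (some (i + 1)) none)) = true
    · simp [pvLoopA, pvHit, pvHitVal, h, hb]
    · simp [pvLoopA, pvHit, h, hb]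

lemma pvRange_neg_nil (a : Int) (h : a ≤ 0) : PySem.List.pyRange a 0 (-1) = [] := by
  simp [PySem.List.pyRange]
  omega

lemma pvRange_neg_cons (a : Int) (h : 0 < a) :
    PySem.List.pyRange a 0 (-1) = a :: PySem.List.pyRange (a - 1) 0 (-1) := by
  have hc : ((a - 0 + -(-1) - 1) / -(-1)).toNat = ((a - 1 - 0 + -(-1) - 1) / -(-1)).toNat + 1 := by
    simp; omega
  simp only [PySem.List.pyRange, if_neg (by norm_num : ¬ (-1 : Int) = 0),
    if_neg (by norm_num : ¬ (0:Int) < -1), if_pos h]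
  by_cases h1 : (0:Int) < a - 1
  · simp only [if_pos h1]
    rw [hc, List.range_succ_eq_map, List.map_cons, List.map_map]
    simp only [List.cons.injEq]
    refine ⟨by push_cast; ring, List.map_congr_left ?_⟩
    intro x _
    simp only [Function.comp_apply]
    push_cast
    ring
  · have ha1 : a = 1 := by omega
    subst ha1
    decide

lemma pvCountDigits_le (l : List Char) : pvCountDigits l ≤ l.length := by
  induction l with
  | nil => simp [pvCountDigits]
  | cons c cs ih =>
    simp only [pvCountDigits, List.length_cons]
    split <;> omega

lemma pvCountDigits_digit (l : List Char) (idx : Nat) (h : idx < pvCountDigits l)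
    (h2 : idx < l.length) : PySem.Chars.isdigit l[idx] = true := by
  induction l generalizing idx with
  | nil => simp at h2
  | cons c cs ih =>
    by_cases hd : PySem.Chars.isdigit c = true
    · cases idx with
      | zero => simpa using hd
      | succ m =>
        simp only [List.getElem_cons_succ]
        exact ih m (by simp [pvCountDigits, hd] at h; omega) (by simpa using h2)
    · simp [pvCountDigits, hd] at h

lemma pvCountDigits_stop (l : List Char) (h : pvCountDigits l < l.length) :
    PySem.Chars.isdigit (l[pvCountDigits l]'h) = false := by
  induction l with
  | nil => simp at h
  | cons c cs ih =>
    by_cases hd : PySem.Chars.isdigit c = true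
    · have he : pvCountDigits (c :: cs) = pvCountDigits cs + 1 := by
        simp [pvCountDigits, hd]
      have h' : pvCountDigits cs < cs.length := by
        have := h; rw [he] at this; simpa using this
      have := ih h'
      simp only [he, List.getElem_cons_succ]
      exact this
    · have he : pvCountDigits (c :: cs) = 0 := by simp [pvCountDigits, hd]
      simp only [he, List.getElem_cons_zero]
      simpa using hd

-- digit-run facts about cs itself
lemma pvRun_digit (cs : List Char) (t : Nat) (h1 : cs.length - pvCountDigits cs.reverse ≤ t)
    (h2 : t < cs.length) : PySem.Chars.isdigit cs[t] = true := by
  have hk := pvCountDigits_le cs.reverse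
  rw [List.length_reverse] at hk
  have hrev : cs.reverse[cs.length - 1 - t]'(by rw [List.length_reverse]; omega) = cs[t] := by
    rw [List.getElem_reverse]
    congr 1
    omega
  rw [← hrev]
  exact pvCountDigits_digit _ _ (by omega) _

lemma pvRun_stop (cs : List Char) (h : pvCountDigits cs.reverse < cs.length) :
    PySem.Chars.isdigit (cs[cs.length - pvCountDigits cs.reverse - 1]'(by omega)) = false := by
  have hrev : cs.reverse[pvCountDigits cs.reverse]'(by rw [List.length_reverse]; omega)
      = cs[cs.length - pvCountDigits cs.reverse - 1]'(by omega) := by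
    rw [List.getElem_reverse]
    congr 1
    omega
  rw [← hrev]
  exact pvCountDigits_stop _ (by rwa [List.length_reverse])

lemma pvStrIsdigit_drop (cs : List Char) (t : Nat) :
    PySem.Chars.strIsdigit (cs.drop t) = true ↔
      t < cs.length ∧ cs.length - pvCountDigits cs.reverse ≤ t := by
  have hkn : pvCountDigits cs.reverse ≤ cs.length := by
    simpa using pvCountDigits_le cs.reverse
  constructor
  · intro h
    simp only [PySem.Chars.strIsdigit, Bool.and_eq_true, List.all_eq_true] at h
    obtain ⟨hne, hall⟩ := h
    have hne' : cs.drop t ≠ [] := by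
      intro hnil
      rw [hnil] at hne
      simp at hne
    have htn : t < cs.length := by
      by_contra hc
      exact hne' (List.drop_eq_nil_of_le (by omega))
    refine ⟨htn, ?_⟩
    by_contra hc
    rw [Nat.not_le] at hc
    have hklt : pvCountDigits cs.reverse < cs.length := by omega
    have hmem : cs[cs.length - pvCountDigits cs.reverse - 1]'(by omega) ∈ cs.drop t := by
      rw [List.mem_iff_getElem]
      refine ⟨cs.length - pvCountDigits cs.reverse - 1 - t, by rw [List.length_drop]; omega, ?_⟩
      rw [List.getElem_drop]
      congr 1
      omega
    have hdg := hall _ hmem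
    rw [pvRun_stop cs hklt] at hdg
    exact absurd hdg (by simp)
  · rintro ⟨htn, hkt⟩
    simp only [PySem.Chars.strIsdigit, Bool.and_eq_true, List.all_eq_true]
    refine ⟨by simp [List.isEmpty_eq_false_iff, List.drop_eq_nil_iff]; omega, ?_⟩
    intro c hc
    rw [List.mem_iff_getElem] at hc
    obtain ⟨u, hu, hcu⟩ := hc
    rw [List.length_drop] at hu
    rw [List.getElem_drop] at hcu
    rw [← hcu]
    exact pvRun_digit cs (t + u) (by omega) (by omega)

lemma pvMonth_not_digit (ch : Char) (h : pvMonthCodes.contains ch = true) :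
    PySem.Chars.isdigit ch = false := by
  have hm : ch ∈ pvMonthCodes.keys := (PySem.Dict.contains_iff_mem_keys _ _).mp h
  have hkeys : pvMonthCodes.keys = ['F','G','H','J','K','M','N','Q','U','V','X','Z'] := by decide
  rw [hkeys] at hm
  fin_cases hm <;> decide

-- the single-candidate characterisation of A's loop condition
lemma pvHit_iff (cs : List Char) (i : Int) (h1 : 1 ≤ i) (h2 : i ≤ (cs.length : Int) - 3) :
    pvHit cs i = true ↔
      (2 ≤ pvCountDigits cs.reverse ∧
       i = (cs.length : Int) - (pvCountDigits cs.reverse : Int) - 1 ∧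
       ∃ ch, PySem.List.pyGet? cs i = some ch ∧ pvMonthCodes.contains ch = true) := by
  have hkn : pvCountDigits cs.reverse ≤ cs.length := by
    simpa using pvCountDigits_le cs.reverse
  have htn : i.toNat < cs.length := by omega
  have hget : PySem.List.pyGet? cs i = some (cs[i.toNat]'htn) := by
    have hg1 : PySem.List.pyGet? cs i = cs[i.toNat]? := by
      conv_lhs => rw [(by omega : i = ((i.toNat : Nat) : Int))]
      simp only [PySem.List.pyGet?_natCast]
    rw [hg1]
    exact List.getElem?_eq_getElem htn
  have hslice : PySem.List.slice cs (some (i + 1)) none = cs.drop (i.toNat + 1) := by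
    have hcast : i + 1 = ((i.toNat + 1 : Nat) : Int) := by omega
    rw [hcast, PySem.List.slice_from_natCast]
  constructor
  · intro h
    simp only [pvHit, hget, Bool.and_eq_true] at h
    obtain ⟨hmon, hdig⟩ := h
    rw [hslice, pvStrIsdigit_drop] at hdig
    have hnd : PySem.Chars.isdigit (cs[i.toNat]'htn) = false := pvMonth_not_digit _ hmon
    have hlt : i.toNat < cs.length - pvCountDigits cs.reverse := by
      by_contra hc
      rw [pvRun_digit cs i.toNat (by omega) htn] at hnd
      exact absurd hnd (by simp)
    refine ⟨by omega, by omega, cs[i.toNat]'htn, hget, hmon⟩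
  · rintro ⟨hk2, hi0, ch, hch, hmon⟩
    rw [hget] at hch
    injection hch with hch
    simp only [pvHit, hget, Bool.and_eq_true]
    refine ⟨hch ▸ hmon, ?_⟩
    rw [hslice, pvStrIsdigit_drop]
    omega

lemma pvLoopA_none (cs : List Char) (m : Nat)
    (h : ∀ i : Int, 1 ≤ i → i ≤ (m : Int) → pvHit cs i = false) :
    pvLoopA cs (PySem.List.pyRange (m : Int) 0 (-1)) = none := by
  induction m with
  | zero => rw [pvRange_neg_nil _ (by omega)]; rfl
  | succ m ih =>
    rw [(by push_cast; ring : ((m + 1 : Nat) : Int) = (m : Int) + 1),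
      pvRange_neg_cons _ (by omega), pvLoopA_cons, if_neg]
    · rw [(by ring : (m : Int) + 1 - 1 = (m : Int))]
      exact ih (fun i hi1 hi2 => h i hi1 (by omega))
    · rw [h ((m : Int) + 1) (by omega) (by omega)]
      simp

lemma pvLoopA_find (cs : List Char) (i₀ : Int) (hi : 1 ≤ i₀) (hhit : pvHit cs i₀ = true)
    (m : Nat) (hm : i₀ ≤ (m : Int))
    (habove : ∀ i : Int, i₀ < i → i ≤ (m : Int) → pvHit cs i = false) :
    pvLoopA cs (PySem.List.pyRange (m : Int) 0 (-1)) = some (pvHitVal cs i₀) := by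
  induction m with
  | zero => omega
  | succ m ih =>
    rw [(by push_cast; ring : ((m + 1 : Nat) : Int) = (m : Int) + 1),
      pvRange_neg_cons _ (by omega), pvLoopA_cons,
      (by ring : (m : Int) + 1 - 1 = (m : Int))]
    by_cases he : i₀ = ((m : Int) + 1)
    · rw [he] at hhit ⊢
      rw [if_pos hhit]
    · rw [if_neg]
      · push_cast at hm
        exact ih (by omega) (fun i hgt hle => habove i hgt (by omega))
      · rw [habove ((m : Int) + 1) (by push_cast at hm; omega) (by omega)]
        simp

lemma pvMain (cs : List Char) (fb : String × String × String) :
    (match pvLoopA cs (PySem.List.pyRange ((cs.length : Int) - 3) 0 (-1)) with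
      | some r => r
      | none => fb) =
    (if 2 ≤ pvCountDigits cs.reverse ∧
        1 ≤ (cs.length : Int) - (pvCountDigits cs.reverse : Int) - 1 then
      match PySem.List.pyGet? cs ((cs.length : Int) - (pvCountDigits cs.reverse : Int) - 1) with
      | some ch =>
        if pvMonthCodes.contains ch then
          (String.ofList (PySem.List.slice cs none (some ((cs.length : Int) - (pvCountDigits cs.reverse : Int) - 1))),
           pvAssetLabels.getD
             (String.ofList (PySem.List.slice cs none (some ((cs.length : Int) - (pvCountDigits cs.reverse : Int) - 1))))
             (String.ofList (PySem.List.slice cs none (some ((cs.length : Int) - (pvCountDigits cs.reverse : Int) - 1)))),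
           String.ofList ((pvMonthCodes.getD ch "").toList ++
             '/' :: PySem.List.slice cs (some ((cs.length : Int) - (pvCountDigits cs.reverse : Int) - 1 + 1)) none))
        else fb
      | none => fb
    else fb) := by
  set n := cs.length with hn
  set k := pvCountDigits cs.reverse with hk
  have hkn : k ≤ n := by rw [hk, hn]; simpa using pvCountDigits_le cs.reverse
  by_cases hC : (2 ≤ k ∧ 1 ≤ (n : Int) - (k : Int) - 1 ∧ pvHit cs ((n : Int) - (k : Int) - 1) = true)
  · obtain ⟨hk2, hi1, hhit⟩ := hC
    have hloop : pvLoopA cs (PySem.List.pyRange ((n : Int) - 3) 0 (-1))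
        = some (pvHitVal cs ((n : Int) - (k : Int) - 1)) := by
      rw [(by omega : ((n : Int) - 3) = (((n - 3 : Nat) : Int)))]
      refine pvLoopA_find cs _ hi1 hhit (n - 3) (by omega) ?_
      intro i hlo hhi
      by_contra hc
      rw [Bool.not_eq_false] at hc
      have := (pvHit_iff cs i (by omega) (by omega)).mp hc
      omega
    rw [hloop, if_pos ⟨hk2, hi1⟩]
    obtain ⟨-, -, ch, hch, hmon⟩ := (pvHit_iff cs _ hi1 (by omega)).mp hhit
    simp [pvHitVal, hch, hmon]
  · have hloop : pvLoopA cs (PySem.List.pyRange ((n : Int) - 3) 0 (-1)) = none := by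
      by_cases hn3 : (n : Int) - 3 ≤ 0
      · rw [pvRange_neg_nil _ hn3]; rfl
      · rw [(by omega : ((n : Int) - 3) = (((n - 3 : Nat) : Int)))]
        refine pvLoopA_none cs (n - 3) ?_
        intro i h1 h2
        by_contra hc
        rw [Bool.not_eq_false] at hc
        obtain ⟨hk2, hi0, -⟩ := (pvHit_iff cs i h1 (by omega)).mp hc
        exact hC ⟨hk2, by omega, hi0 ▸ hc⟩
    rw [hloop]
    by_cases hB : 2 ≤ k ∧ 1 ≤ (n : Int) - (k : Int) - 1
    · obtain ⟨hk2, hi1⟩ := hB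
      rw [if_pos ⟨hk2, hi1⟩]
      cases hch : PySem.List.pyGet? cs ((n : Int) - (k : Int) - 1) with
      | none => rfl
      | some ch =>
        by_cases hmon : pvMonthCodes.contains ch = true
        · exact absurd ⟨hk2, hi1, (pvHit_iff cs _ hi1 (by omega)).mpr ⟨hk2, rfl, ch, hch, hmon⟩⟩ hC
        · simp only [hmon, Bool.false_eq_true, if_false]
    · rw [if_neg hB]

-- ===== VERDICT (by name: the statement is the Claim_ definition above) =====
theorem parse_ticker_spec : Claim_equal_parse_ticker := by
  intro ticker _
  show parse_ticker ticker = parse_ticker_alt ticker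
  exact pvMain ticker.toList (ticker, pvAssetLabels.getD ticker ticker, "")
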